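-- pv_equiv track=rewrite | github.com/vhlebnikov/Cybersecurity_Course | Kuznechik/kuznechik.py | mul_polynomial
-- ===== SOURCE A (Python) =====
-- def mul_polynomial(a, b):
--     res = 0
--     for i in range(8):
--         if b & 1 == 1:
--             res = res ^ a
--         hi_bit_set = a & 0x80
--         a = a << 1
--         if hi_bit_set == 0x80:
--             a = a ^ 0xc3  # x^8+x^7+x^6+x+1
--         b = b >> 1
--     return res % 256
-- ===== SOURCE B (Python) =====
-- def mul_polynomial(a, b):
--     res = 0
--     for bit in (0x80, 0x40, 0x20, 0x10, 0x08, 0x04, 0x02, 0x01):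
--         if res & 0x80:
--             res = (res << 1) ^ 0xc3
--         else:
--             res = res << 1
--         if b & bit:
--             res = res ^ a
--     return res % 256
-- ===== Notes on version B (the rewrite author's own statement) =====
-- stated objective: alternative
-- what changed: B replaces A's LSB-first loop that shifts-and-reduces the operand a while scanning b's low bits with an MSB-first Horner scheme: the accumulator itself is doubled-and-reduced once per step and a is XORed in when the corresponding high-to-low bit of b is set; a and b are never mutated.
import Mathlib
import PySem

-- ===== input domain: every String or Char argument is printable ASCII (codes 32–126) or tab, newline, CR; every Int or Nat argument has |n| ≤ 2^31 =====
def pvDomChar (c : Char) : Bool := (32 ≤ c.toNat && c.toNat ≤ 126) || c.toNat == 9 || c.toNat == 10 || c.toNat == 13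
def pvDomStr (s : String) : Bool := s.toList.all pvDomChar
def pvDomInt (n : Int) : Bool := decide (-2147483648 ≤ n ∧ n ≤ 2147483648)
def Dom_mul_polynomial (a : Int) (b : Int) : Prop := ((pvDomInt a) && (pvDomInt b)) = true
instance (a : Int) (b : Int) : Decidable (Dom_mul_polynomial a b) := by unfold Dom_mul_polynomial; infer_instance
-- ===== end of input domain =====

-- B replaces A's LSB-first loop (which shifts and reduces the operand a) by an MSB-first Horner
-- scheme that doubles-and-reduces the accumulator instead (objective: alternative, same cost).


-- ===== PORT A =====
-- A: LSB-first Russian-peasant GF(2^8) multiply; shifts/reduces the operand a, consumes b bit by bit.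
def mulA_step (st : Int × Int × Int) (_i : Int) : Int × Int × Int :=
  match st with
  | (res, a, b) =>
    let res := if PySem.Int.band b 1 = 1 then PySem.Int.bxor res a else res
    let hi_bit_set := PySem.Int.band a 128
    let a := a <<< (1 : Nat)
    let a := if hi_bit_set = 128 then PySem.Int.bxor a 195 else a
    let b := b >>> (1 : Nat)
    (res, a, b)

def mul_polynomial (a : Int) (b : Int) : Int :=
  PySem.Int.mod ((PySem.List.pyRange 0 8 1).foldl mulA_step (0, a, b)).1 256

-- ===== PORT B =====
-- B: MSB-first Horner scheme; the accumulator is doubled-and-reduced, a and b are never mutated.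
def mulB_step (a : Int) (b : Int) (res : Int) (bit : Int) : Int :=
  let res := if PySem.Int.band res 128 ≠ 0 then PySem.Int.bxor (res <<< (1 : Nat)) 195
             else res <<< (1 : Nat)
  if PySem.Int.band b bit ≠ 0 then PySem.Int.bxor res a else res

def mul_polynomial_alt (a : Int) (b : Int) : Int :=
  PySem.Int.mod (([128, 64, 32, 16, 8, 4, 2, 1] : List Int).foldl (mulB_step a b) 0) 256

-- ===== PRECONDITION & SPEC =====
def Spec_mul_polynomial (a : Int) (b : Int) (out : Int) : Prop := out = mul_polynomial_alt a b
instance (a : Int) (b : Int) (out : Int) : Decidable (Spec_mul_polynomial a b out) := by unfold Spec_mul_polynomial; infer_instance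

-- ===== CLAIM (what is proved, stated in full; the proofs are below) =====
def Claim_equal_mul_polynomial : Prop := ∀ (a : Int) (b : Int), Dom_mul_polynomial a b → Spec_mul_polynomial a b (mul_polynomial a b)

-- ===== LEMMAS AND PROOFS =====

/-- Python's bit i of an integer (infinite two's complement). -/
def itb (x : Int) (i : Nat) : Bool :=
  if 0 ≤ x then x.toNat.testBit i else !((-x - 1).toNat.testBit i)

lemma itb_ofNat (m : Nat) (i : Nat) : itb (Int.ofNat m) i = m.testBit i := by
  simp [itb]

lemma itb_negSucc (m : Nat) (i : Nat) : itb (Int.negSucc m) i = !(m.testBit i) := by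
  have h1 : ¬ (0 : Int) ≤ Int.negSucc m := by omega
  have h2 : (-(Int.negSucc m) - 1).toNat = m := by omega
  simp [itb, h1]

lemma itb_ext {x y : Int} (h : ∀ i, itb x i = itb y i) : x = y := by
  cases x with
  | ofNat m =>
    cases y with
    | ofNat n =>
      have : m = n := by
        apply Nat.eq_of_testBit_eq
        intro i
        have := h i
        simpa [itb_ofNat] using this
      simp [this]
    | negSucc n =>
      exfalso
      have := h (m + n)
      rw [itb_ofNat, itb_negSucc] at this
      have hm : m.testBit (m + n) = false :=
        Nat.testBit_lt_two_pow (lt_of_lt_of_le Nat.lt_two_pow_self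
          (Nat.pow_le_pow_right (by norm_num) (Nat.le_add_right m n)))
      have hn : n.testBit (m + n) = false :=
        Nat.testBit_lt_two_pow (lt_of_lt_of_le Nat.lt_two_pow_self
          (Nat.pow_le_pow_right (by norm_num) (Nat.le_add_left n m)))
      rw [hm, hn] at this
      simp at this
  | negSucc m =>
    cases y with
    | ofNat n =>
      exfalso
      have := h (m + n)
      rw [itb_negSucc, itb_ofNat] at this
      have hm : m.testBit (m + n) = false :=
        Nat.testBit_lt_two_pow (lt_of_lt_of_le Nat.lt_two_pow_self
          (Nat.pow_le_pow_right (by norm_num) (Nat.le_add_right m n)))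
      have hn : n.testBit (m + n) = false :=
        Nat.testBit_lt_two_pow (lt_of_lt_of_le Nat.lt_two_pow_self
          (Nat.pow_le_pow_right (by norm_num) (Nat.le_add_left n m)))
      rw [hm, hn] at this
      simp at this
    | negSucc n =>
      have : m = n := by
        apply Nat.eq_of_testBit_eq
        intro i
        have := h i
        rw [itb_negSucc, itb_negSucc] at this
        simpa using this
      simp [this]

lemma itb_bxor (x y : Int) (i : Nat) :
    itb (PySem.Int.bxor x y) i = xor (itb x i) (itb y i) := by
  cases x with
  | ofNat m =>
    cases y with
    | ofNat n =>
      have e : PySem.Int.bxor (Int.ofNat m) (Int.ofNat n) = Int.ofNat (m ^^^ n) := by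
        simp [PySem.Int.bxor]
      rw [e, itb_ofNat, itb_ofNat, itb_ofNat, Nat.testBit_xor]
    | negSucc n =>
      have e : PySem.Int.bxor (Int.ofNat m) (Int.negSucc n) = Int.negSucc (m ^^^ n) := by
        have h1 : ¬ (0 : Int) ≤ Int.negSucc n := by omega
        have h2 : (-(Int.negSucc n) - 1).toNat = n := by omega
        simp [PySem.Int.bxor, h1]
        omega
      rw [e, itb_ofNat, itb_negSucc, itb_negSucc, Nat.testBit_xor]
      cases m.testBit i <;> cases n.testBit i <;> rfl
  | negSucc m =>
    cases y with
    | ofNat n =>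
      have e : PySem.Int.bxor (Int.negSucc m) (Int.ofNat n) = Int.negSucc (m ^^^ n) := by
        have h1 : ¬ (0 : Int) ≤ Int.negSucc m := by omega
        have h2 : (-(Int.negSucc m) - 1).toNat = m := by omega
        simp [PySem.Int.bxor, h1]
        omega
      rw [e, itb_negSucc, itb_negSucc, itb_ofNat, Nat.testBit_xor]
      cases m.testBit i <;> cases n.testBit i <;> rfl
    | negSucc n =>
      have e : PySem.Int.bxor (Int.negSucc m) (Int.negSucc n) = Int.ofNat (m ^^^ n) := by
        have h1 : ¬ (0 : Int) ≤ Int.negSucc m := by omega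
        have h2 : ¬ (0 : Int) ≤ Int.negSucc n := by omega
        have h3 : (-(Int.negSucc m) - 1).toNat = m := by omega
        have h4 : (-(Int.negSucc n) - 1).toNat = n := by omega
        simp [PySem.Int.bxor, h1, h2]
      rw [e, itb_ofNat, itb_negSucc, itb_negSucc, Nat.testBit_xor]
      cases m.testBit i <;> cases n.testBit i <;> rfl

lemma band_two_pow (x : Int) (k : Nat) :
    PySem.Int.band x (2 ^ k) = if itb x k then ((2 ^ k : Nat) : Int) else 0 := by
  have hc : ((2 : Int) ^ k) = ((2 ^ k : Nat) : Int) := by push_cast; ring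
  have ht : ((2 : Int) ^ k).toNat = 2 ^ k := rfl
  cases x with
  | ofNat m =>
    rw [hc, itb_ofNat]
    have e : PySem.Int.band (Int.ofNat m) ((2 ^ k : Nat) : Int) = ((m &&& 2 ^ k : Nat) : Int) := by
      simp [PySem.Int.band, Int.toNat_natCast, ht]
    rw [e, Nat.and_two_pow]
    cases m.testBit k <;> simp
  | negSucc m =>
    rw [hc, itb_negSucc]
    have h1 : ¬ (0 : Int) ≤ Int.negSucc m := by omega
    have h2 : (-(Int.negSucc m) - 1).toNat = m := by omega
    have e : PySem.Int.band (Int.negSucc m) ((2 ^ k : Nat) : Int) =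
        ((2 ^ k - (2 ^ k &&& m) : Nat) : Int) := by
      simp [PySem.Int.band, h1, Int.toNat_natCast, ht]
    rw [e, Nat.two_pow_and]
    cases m.testBit k <;> simp

lemma itb_shl_zero (x : Int) : itb (x <<< (1 : Nat)) 0 = false := by
  cases x with
  | ofNat m =>
    have e : (Int.ofNat m) <<< (1 : Nat) = Int.ofNat (m <<< 1) := rfl
    rw [e, itb_ofNat]
    simp
  | negSucc m =>
    have e : (Int.negSucc m) <<< (1 : Nat) = Int.negSucc ((m + 1) <<< 1 - 1) := rfl
    have e2 : (m + 1) <<< 1 - 1 = 2 * m + 1 := by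
      rw [Nat.shiftLeft_eq]; omega
    rw [e, e2, itb_negSucc, Nat.testBit_zero]
    simp

lemma itb_shl_succ (x : Int) (i : Nat) : itb (x <<< (1 : Nat)) (i + 1) = itb x i := by
  cases x with
  | ofNat m =>
    have e : (Int.ofNat m) <<< (1 : Nat) = Int.ofNat (m <<< 1) := rfl
    rw [e, itb_ofNat, itb_ofNat]
    simp [Nat.testBit_shiftLeft]
  | negSucc m =>
    have e : (Int.negSucc m) <<< (1 : Nat) = Int.negSucc ((m + 1) <<< 1 - 1) := rfl
    have e2 : (m + 1) <<< 1 - 1 = 2 * m + 1 := by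
      rw [Nat.shiftLeft_eq]; omega
    have e3 : (2 * m + 1) / 2 = m := by omega
    rw [e, e2, itb_negSucc, itb_negSucc, Nat.testBit_add_one, e3]

lemma itb_shr (x : Int) (i : Nat) : itb (x >>> (1 : Nat)) i = itb x (i + 1) := by
  cases x with
  | ofNat m =>
    have e : (Int.ofNat m) >>> (1 : Nat) = Int.ofNat (m >>> 1) := rfl
    rw [e, itb_ofNat, itb_ofNat, Nat.testBit_shiftRight, Nat.add_comm]
  | negSucc m =>
    have e : (Int.negSucc m) >>> (1 : Nat) = Int.negSucc (m >>> 1) := rfl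
    rw [e, itb_negSucc, itb_negSucc, Nat.testBit_shiftRight, Nat.add_comm]

lemma bxor_zero_left (x : Int) : PySem.Int.bxor 0 x = x := by
  rw [PySem.Int.bxor_comm]; exact PySem.Int.bxor_zero x

lemma bxor_assoc (x y z : Int) :
    PySem.Int.bxor (PySem.Int.bxor x y) z = PySem.Int.bxor x (PySem.Int.bxor y z) := by
  apply itb_ext; intro i
  simp [itb_bxor]

lemma bxor_left_comm (x y z : Int) :
    PySem.Int.bxor x (PySem.Int.bxor y z) = PySem.Int.bxor y (PySem.Int.bxor x z) := by
  apply itb_ext; intro i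
  simp [itb_bxor, Bool.xor_left_comm]

/-- A's per-step transform of the running operand (xtime with A's unmasked reduction). -/
def fA (z : Int) : Int :=
  if PySem.Int.band z 128 = 128 then PySem.Int.bxor (z <<< (1 : Nat)) 195
  else z <<< (1 : Nat)

lemma band128_eq (z : Int) :
    PySem.Int.band z 128 = if itb z 7 then (128 : Int) else 0 := by
  have := band_two_pow z 7
  norm_num at this
  norm_num [this]

lemma fA_eq (z : Int) :
    fA z = if itb z 7 then PySem.Int.bxor (z <<< (1 : Nat)) 195 else z <<< (1 : Nat) := by
  rw [fA, band128_eq]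
  by_cases h : itb z 7 <;> simp [h]

lemma fA_zero : fA 0 = 0 := by decide

lemma shl_bxor (x y : Int) :
    (PySem.Int.bxor x y) <<< (1 : Nat) = PySem.Int.bxor (x <<< (1 : Nat)) (y <<< (1 : Nat)) := by
  apply itb_ext; intro i
  cases i with
  | zero => simp [itb_shl_zero, itb_bxor]
  | succ j => simp [itb_shl_succ, itb_bxor]

lemma fA_lin (x y : Int) : fA (PySem.Int.bxor x y) = PySem.Int.bxor (fA x) (fA y) := by
  rw [fA_eq, fA_eq, fA_eq]
  have h7 : itb (PySem.Int.bxor x y) 7 = xor (itb x 7) (itb y 7) := itb_bxor x y 7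
  by_cases hx : itb x 7 <;> by_cases hy : itb y 7 <;>
    simp [hx, hy, h7, shl_bxor] <;>
    apply itb_ext <;> intro i <;>
    simp [itb_bxor] <;>
    cases itb (x <<< (1:Nat)) i <;> cases itb (y <<< (1:Nat)) i <;> cases itb (195 : Int) i <;> rfl

lemma fA_iter_lin (n : Nat) (x y : Int) :
    fA^[n] (PySem.Int.bxor x y) = PySem.Int.bxor (fA^[n] x) (fA^[n] y) := by
  induction n generalizing x y with
  | zero => simp
  | succ n ih => simp [Function.iterate_succ_apply, fA_lin, ih]

/-- Term i of the common XOR-of-iterates normal form. -/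
def tA (a b : Int) (i : Nat) : Int := if itb b i then fA^[i] a else 0

/-- Canonical value: XOR of tA over bits 0..n-1. -/
def W (a b : Int) (n : Nat) : Int :=
  (List.range n).foldr (fun i acc => PySem.Int.bxor (tA a b i) acc) 0

/-- A's recursion scheme, extracted. -/
def SA : Nat → Int → Int → Int
  | 0, _, _ => 0
  | n + 1, a, b =>
      PySem.Int.bxor (if PySem.Int.band b 1 = 1 then a else 0)
        (SA n (fA a) (b >>> (1 : Nat)))

lemma band1_eq (z : Int) :
    PySem.Int.band z 1 = if itb z 0 then (1 : Int) else 0 := by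
  have := band_two_pow z 0
  norm_num at this
  norm_num [this]

lemma SA_eq_W (n : Nat) (a b : Int) : SA n a b = W a b n := by
  induction n generalizing a b with
  | zero => simp [SA, W]
  | succ n ih =>
    rw [SA, ih, W, W, List.range_succ_eq_map, List.foldr_cons, List.foldr_map]
    congr 1
    · rw [band1_eq, tA]
      by_cases h : itb b 0 <;> simp [h]
    · have ht : ∀ i : Nat, tA (fA a) (b >>> (1 : Nat)) i = tA a b (i + 1) := by
        intro i
        rw [tA, tA, itb_shr, ← Function.iterate_succ_apply]
      simp only [ht, Nat.succ_eq_add_one]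

lemma A_loop (l : List Int) (res a b : Int) :
    (l.foldl mulA_step (res, a, b)).1 = PySem.Int.bxor res (SA l.length a b) := by
  induction l generalizing res a b with
  | nil => simp [SA, PySem.Int.bxor_zero]
  | cons x l ih =>
    rw [List.foldl_cons, List.length_cons]
    have e : mulA_step (res, a, b) x =
        ((if PySem.Int.band b 1 = 1 then PySem.Int.bxor res a else res), fA a, b >>> (1 : Nat)) := by
      simp [mulA_step, fA]
    rw [e, ih, SA]
    by_cases h : PySem.Int.band b 1 = 1 <;>
      simp [h, bxor_assoc, bxor_zero_left]

/-- Exponent list 2^(n-1), ..., 2^0. -/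
def pows : Nat → List Int
  | 0 => []
  | n + 1 => ((2 ^ n : Nat) : Int) :: pows n

lemma xor_foldr (g : Nat → Int) (l : List Nat) (t : Int) :
    PySem.Int.bxor t (l.foldr (fun i acc => PySem.Int.bxor (g i) acc) 0) =
      l.foldr (fun i acc => PySem.Int.bxor (g i) acc) t := by
  induction l generalizing t with
  | nil => simp [PySem.Int.bxor_zero]
  | cons i l ih => rw [List.foldr_cons, List.foldr_cons, bxor_left_comm, ih]

lemma B_step_eq (a b r : Int) (k : Nat) :
    mulB_step a b r ((2 ^ k : Nat) : Int) =
      PySem.Int.bxor (fA r) (if itb b k then a else 0) := by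
  have hc : ((2 ^ k : Nat) : Int) = (2 : Int) ^ k := by push_cast; ring
  rw [mulB_step, hc, band_two_pow b k, band128_eq r, fA_eq]
  by_cases hr : itb r 7 <;> by_cases hb : itb b k <;>
    simp [hr, hb, PySem.Int.bxor_comm, bxor_zero_left]

lemma B_loop (a b : Int) (n : Nat) (r : Int) :
    (pows n).foldl (mulB_step a b) r = PySem.Int.bxor (fA^[n] r) (W a b n) := by
  induction n generalizing r with
  | zero => simp [pows, W, PySem.Int.bxor_zero]
  | succ n ih =>
    rw [pows, List.foldl_cons, ih, B_step_eq]
    rw [fA_iter_lin]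
    have h1 : fA^[n] (if itb b n then a else 0) = tA a b n := by
      rw [tA]
      by_cases h : itb b n <;> simp [h, Function.iterate_fixed fA_zero]
    rw [h1, bxor_assoc]
    have h2 : fA^[n] (fA r) = fA^[n + 1] r := by
      rw [Function.iterate_succ_apply]
    rw [h2]
    congr 1
    rw [W, W, List.range_succ, List.foldr_append, List.foldr_cons, List.foldr_nil,
      PySem.Int.bxor_zero, xor_foldr]

-- ===== VERDICT (by name: the statement is the Claim_ definition above) =====
theorem mul_polynomial_spec : Claim_equal_mul_polynomial := by
  intro a b _
  unfold Spec_mul_polynomial mul_polynomial mul_polynomial_alt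
  have hA : (PySem.List.pyRange 0 8 1) = ([0,1,2,3,4,5,6,7] : List Int) := by decide
  have hB : ([128, 64, 32, 16, 8, 4, 2, 1] : List Int) = pows 8 := by decide
  rw [hA, hB]
  have e1 := A_loop ([0,1,2,3,4,5,6,7] : List Int) 0 a b
  have e2 := B_loop a b 8 0
  simp only [List.length_cons, List.length_nil] at e1
  rw [e1, e2, SA_eq_W, bxor_zero_left, Function.iterate_fixed fA_zero, bxor_zero_left]
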